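-- pv_equiv track=rewrite | github.com/chboishabba/FRACDASH | scripts/freeze_monster10walk_canonical.py | longest_desc_chain
-- ===== SOURCE A (Python) =====
-- def longest_desc_chain(n: int, edges: list[tuple[int, int]], stability: list[int]) -> int:
--     graph: dict[int, list[int]] = {i: [] for i in range(n)}
--     for src, dst in edges:
--         if stability[src] > stability[dst]:
--             graph[src].append(dst)
--     memo: dict[int, int] = {}
--
--     def dfs(node: int) -> int:
--         if node in memo:
--             return memo[node]
--         best = 1
--         for nxt in graph[node]:
--             best = max(best, 1 + dfs(nxt))
--         memo[node] = best
--         return best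
--
--     return max((dfs(i) for i in range(n)), default=0)
-- ===== SOURCE B (Python) =====
-- def longest_desc_chain(n: int, edges: list[tuple[int, int]], stability: list[int]) -> int:
--     if n <= 0:
--         return 0
--     adj: dict[int, list[int]] = {}
--     for src, dst in edges:
--         if stability[src] > stability[dst]:
--             adj.setdefault(src, []).append(dst)
--     dp: dict[int, int] = {}
--     for node in sorted(adj, key=lambda i: stability[i]):
--         dp[node] = 1 + max(dp.get(d, 1) for d in adj[node])
--     return max(dp.values(), default=1)
-- ===== Notes on version B (the rewrite author's own statement) =====
-- stated objective: faster
-- what changed: A's memoized top-down recursive DFS over a dict pre-initialized with {i: [] for i in range(n)} is replaced by a non-recursive bottom-up DP: B keeps adjacency only for actual edge sources, processes those sources in ascending-stability order (every filtered edge points to strictly lower stability, so destinations are final when read), and returns the max of the dp table, doing no per-node work over range(n).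
import Mathlib
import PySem

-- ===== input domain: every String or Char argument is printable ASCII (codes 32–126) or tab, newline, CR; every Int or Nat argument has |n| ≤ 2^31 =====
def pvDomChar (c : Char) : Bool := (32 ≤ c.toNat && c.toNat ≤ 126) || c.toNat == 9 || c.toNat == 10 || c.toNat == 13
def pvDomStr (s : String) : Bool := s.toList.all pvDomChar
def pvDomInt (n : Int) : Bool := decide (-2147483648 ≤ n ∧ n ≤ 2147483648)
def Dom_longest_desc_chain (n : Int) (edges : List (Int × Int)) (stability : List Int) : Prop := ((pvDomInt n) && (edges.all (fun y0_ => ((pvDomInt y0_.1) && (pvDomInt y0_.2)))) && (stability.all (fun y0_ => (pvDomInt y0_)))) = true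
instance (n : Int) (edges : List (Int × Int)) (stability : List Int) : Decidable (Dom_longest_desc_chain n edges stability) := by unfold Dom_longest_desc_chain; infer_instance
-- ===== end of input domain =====

-- B replaces A's memoized top-down DFS (over a dict pre-initialized for all of range(n)) by a
-- single bottom-up DP pass over the edge sources sorted by stability (destinations always have
-- strictly lower stability, so they are final when read); B is intended to be faster by doing
-- no per-node work over range(n).

-- ===== PORT A =====
-- stability[i]  (Python indexing; total via default 0 — Pre_ guarantees the index is valid
-- wherever A evaluates it)
def pvStab (stability : List Int) (i : Int) : Int := (PySem.List.pyGet? stability i).getD 0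

-- graph = {i: [] for i in range(n)}; for src, dst in edges: if stability[src] > stability[dst]: graph[src].append(dst)
-- (graph[src].append on a present key is Dict.modify; Pre_ guarantees the key is present)
def pvGraphA (n : Int) (edges : List (Int × Int)) (stability : List Int) : PySem.Dict Int (List Int) :=
  edges.foldl
    (fun g e => if pvStab stability e.1 > pvStab stability e.2 then g.modify e.1 [] (fun l => l ++ [e.2]) else g)
    ((PySem.List.pyRange 0 n 1).foldl (fun g i => g.insert i ([] : List Int)) PySem.Dict.empty)

-- dfs with a fuel totality guard (the Python recursion always terminates under Pre_ because
-- stability strictly decreases along graph edges; fuel n.toNat is never exhausted there).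
-- A's memo dict only caches results of this pure function, so it is value-transparent and
-- not threaded through the port.
def pvDfsA (g : PySem.Dict Int (List Int)) : Nat → Int → Int
  | 0, _ => 1
  | f+1, node => (g.getD node []).foldl (fun best nxt => max best (1 + pvDfsA g f nxt)) 1

-- return max((dfs(i) for i in range(n)), default=0)
def longest_desc_chain (n : Int) (edges : List (Int × Int)) (stability : List Int) : Int :=
  (PySem.List.max? ((PySem.List.pyRange 0 n 1).map (pvDfsA (pvGraphA n edges stability) n.toNat)) (fun x => x)).getD 0

-- ===== PORT B =====
-- adj.setdefault(src, []).append(dst)  =  Dict.modify src [] (· ++ [dst])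
def pvAdjB (edges : List (Int × Int)) (stability : List Int) : PySem.Dict Int (List Int) :=
  edges.foldl
    (fun d e => if pvStab stability e.1 > pvStab stability e.2 then d.modify e.1 [] (fun l => l ++ [e.2]) else d)
    PySem.Dict.empty

-- for node in sorted(adj, key=lambda i: stability[i]): dp[node] = 1 + max(dp.get(d, 1) for d in adj[node])
-- (adj[node] is nonempty for node in adj, so Python's max over the nonempty generator is
-- ported as max? with a junk default)
def pvDpB (stability : List Int) (adj : PySem.Dict Int (List Int)) : PySem.Dict Int Int :=
  (PySem.List.sorted adj.keys (fun i => pvStab stability i) false).foldl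
    (fun dp node => dp.insert node (1 + ((PySem.List.max? ((adj.getD node []).map (fun d => dp.getD d 1)) (fun x => x)).getD 0)))
    PySem.Dict.empty

def longest_desc_chain_alt (n : Int) (edges : List (Int × Int)) (stability : List Int) : Int :=
  if n ≤ 0 then 0
  else ((PySem.List.max? (pvDpB stability (pvAdjB edges stability)).values (fun x => x)).getD 1)

-- ===== PRECONDITION & SPEC =====
-- Pre_ = exactly the inputs on which the Python A returns normally: every edge endpoint is a
-- valid (possibly negative) index into stability, and an edge that passes the stability
-- filter has both endpoints in range(n) (otherwise A raises IndexError / KeyError).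
def Pre_longest_desc_chain (n : Int) (edges : List (Int × Int)) (stability : List Int) : Prop :=
  ∀ e ∈ edges, (PySem.List.pyGet? stability e.1).isSome ∧ (PySem.List.pyGet? stability e.2).isSome ∧
    (pvStab stability e.1 > pvStab stability e.2 → 0 ≤ e.1 ∧ e.1 < n ∧ 0 ≤ e.2 ∧ e.2 < n)
instance (n : Int) (edges : List (Int × Int)) (stability : List Int) : Decidable (Pre_longest_desc_chain n edges stability) := by unfold Pre_longest_desc_chain; infer_instance

def pvWitness_longest_desc_chain : Int × (List (Int × Int)) × List Int := (2, [(0, 1)], [5, 3])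

def Spec_longest_desc_chain (n : Int) (edges : List (Int × Int)) (stability : List Int) (out : Int) : Prop := out = longest_desc_chain_alt n edges stability
instance (n : Int) (edges : List (Int × Int)) (stability : List Int) (out : Int) : Decidable (Spec_longest_desc_chain n edges stability out) := by unfold Spec_longest_desc_chain; infer_instance

-- ===== CLAIM (what is proved, stated in full; the proofs are below) =====
def Claim_equal_longest_desc_chain : Prop := ∀ (n : Int) (edges : List (Int × Int)) (stability : List Int), Dom_longest_desc_chain n edges stability → Pre_longest_desc_chain n edges stability → Spec_longest_desc_chain n edges stability (longest_desc_chain n edges stability)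

-- ===== LEMMAS AND PROOFS =====

-- edges that survive the stability filter
def pvFiltered (edges : List (Int × Int)) (stability : List Int) : List (Int × Int) :=
  edges.filter (fun e => decide (pvStab stability e.1 > pvStab stability e.2))

-- successors of v in the filtered graph, in edge order
def pvSuccs (edges : List (Int × Int)) (stability : List Int) (v : Int) : List Int :=
  ((pvFiltered edges stability).filter (fun e => e.1 == v)).map (·.2)

-- number of nodes in range(n) with strictly smaller stability: a termination rank
def pvRank (n : Int) (stability : List Int) (v : Int) : Nat :=
  ((PySem.List.pyRange 0 n 1).filter (fun i => decide (pvStab stability i < pvStab stability v))).length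

-- the chain-length recurrence, fuel-indexed
def pvChainF (edges : List (Int × Int)) (stability : List Int) : Nat → Int → Int
  | 0, _ => 1
  | f+1, v => (pvSuccs edges stability v).foldl (fun b d => max b (1 + pvChainF edges stability f d)) 1

-- the true chain length of node v
def pvChain (n : Int) (edges : List (Int × Int)) (stability : List Int) (v : Int) : Int :=
  pvChainF edges stability (pvRank n stability v + 1) v


-- the initial graph dict {i: [] for i in range(n)} looks up to [] everywhere
theorem pvInitGetD : ∀ (l : List Int) (d : PySem.Dict Int (List Int)),
    (∀ c, d.getD c [] = []) → ∀ c, (l.foldl (fun g i => g.insert i ([] : List Int)) d).getD c [] = [] := by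
  intro l
  induction l with
  | nil => intro d h c; exact h c
  | cons x xs ih =>
    intro d h c
    simp only [List.foldl_cons]
    refine ih _ (fun c' => ?_) c
    rw [PySem.Dict.getD_insert]
    split
    · rfl
    · exact h c'

theorem pvGraphA_getD (n : Int) (edges : List (Int × Int)) (stability : List Int) (c : Int) :
    (pvGraphA n edges stability).getD c [] = pvSuccs edges stability c := by
  unfold pvGraphA pvSuccs pvFiltered
  rw [PySem.List.foldl_ite_eq_foldl_filter]
  rw [PySem.Dict.getD_foldl_modify_append]
  rw [pvInitGetD (PySem.List.pyRange 0 n 1) PySem.Dict.empty (fun c' => PySem.Dict.getD_empty c' []) c]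
  simp

theorem pvAdjB_getD (edges : List (Int × Int)) (stability : List Int) (c : Int) :
    (pvAdjB edges stability).getD c [] = pvSuccs edges stability c := by
  unfold pvAdjB pvSuccs pvFiltered
  rw [PySem.List.foldl_ite_eq_foldl_filter]
  rw [PySem.Dict.getD_foldl_modify_append]
  simp

theorem pvAdjB_keys (edges : List (Int × Int)) (stability : List Int) :
    (pvAdjB edges stability).keys = PySem.Set.ofList ((pvFiltered edges stability).map (·.1)) := by
  unfold pvAdjB pvFiltered
  rw [PySem.List.foldl_ite_eq_foldl_filter]
  have hk := PySem.Dict.keys_foldl_modify_key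
    (edges.filter (fun e => decide (pvStab stability e.1 > pvStab stability e.2)))
    (fun e => e.1) ([] : List Int) (fun _ e => (fun l => l ++ [e.2])) PySem.Dict.empty
  simp only [] at hk
  rw [hk]
  simp [PySem.Set.update_nil_left]

theorem pvAdjB_keys_nodup (edges : List (Int × Int)) (stability : List Int) :
    (pvAdjB edges stability).keys.Nodup := by
  rw [pvAdjB_keys]; exact PySem.Set.nodup_ofList _

theorem pvMem_adjB_keys (edges : List (Int × Int)) (stability : List Int) (v : Int) :
    v ∈ (pvAdjB edges stability).keys ↔ pvSuccs edges stability v ≠ [] := by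
  rw [pvAdjB_keys, PySem.Set.mem_ofList]
  unfold pvSuccs
  constructor
  · rintro h hnil
    simp only [List.mem_map] at h
    obtain ⟨e, he, hfst⟩ := h
    rw [List.map_eq_nil_iff, List.filter_eq_nil_iff] at hnil
    exact hnil e he (by simp [hfst])
  · intro h
    rcases List.exists_mem_of_ne_nil _ h with ⟨d, hd⟩
    simp only [List.mem_map, List.mem_filter] at hd
    obtain ⟨e, ⟨he, hfst⟩, _⟩ := hd
    exact List.mem_map.mpr ⟨e, he, by simpa using hfst⟩

theorem pvDfsA_eq_chainF (n : Int) (edges : List (Int × Int)) (stability : List Int) (f : Nat) (v : Int) :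
    pvDfsA (pvGraphA n edges stability) f v = pvChainF edges stability f v := by
  induction f generalizing v with
  | zero => rfl
  | succ f ih =>
    rw [pvDfsA, pvChainF, pvGraphA_getD]
    refine PySem.List.foldl_congr_mem _ _ _ _ ?_
    intro acc x _
    rw [ih]

theorem pvSuccs_bounds (n : Int) (edges : List (Int × Int)) (stability : List Int)
    (hpre : Pre_longest_desc_chain n edges stability) (v d : Int) (hd : d ∈ pvSuccs edges stability v) :
    0 ≤ v ∧ v < n ∧ 0 ≤ d ∧ d < n ∧ pvStab stability d < pvStab stability v := by
  unfold pvSuccs pvFiltered at hd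
  simp only [List.mem_map, List.mem_filter, decide_eq_true_eq, beq_iff_eq] at hd
  obtain ⟨e, ⟨⟨he, hcond⟩, hfst⟩, hsnd⟩ := hd
  obtain ⟨_, _, hb⟩ := hpre e he
  obtain ⟨h1, h2, h3, h4⟩ := hb hcond
  subst hfst hsnd
  exact ⟨h1, h2, h3, h4, hcond⟩

theorem pvFilterLenMono (l : List Int) (p q : Int → Bool)
    (h : ∀ x ∈ l, p x = true → q x = true) :
    (l.filter p).length ≤ (l.filter q).length := by
  rw [← List.countP_eq_length_filter, ← List.countP_eq_length_filter]
  exact List.countP_mono_left h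

theorem pvRank_lt (n : Int) (edges : List (Int × Int)) (stability : List Int)
    (hpre : Pre_longest_desc_chain n edges stability) (v d : Int) (hd : d ∈ pvSuccs edges stability v) :
    pvRank n stability d < pvRank n stability v := by
  obtain ⟨hv0, hvn, hd0, hdn, hlt⟩ := pvSuccs_bounds n edges stability hpre v d hd
  unfold pvRank
  rw [PySem.List.pyRange_one_append 0 d n (by omega) (by omega),
      PySem.List.pyRange_one_cons (show d < n by omega)]
  have e1 : List.filter (fun i => decide (pvStab stability i < pvStab stability d)) (d :: PySem.List.pyRange (d+1) n 1)
      = List.filter (fun i => decide (pvStab stability i < pvStab stability d)) (PySem.List.pyRange (d+1) n 1) := by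
    simp
  have e2 : List.filter (fun i => decide (pvStab stability i < pvStab stability v)) (d :: PySem.List.pyRange (d+1) n 1)
      = d :: List.filter (fun i => decide (pvStab stability i < pvStab stability v)) (PySem.List.pyRange (d+1) n 1) := by
    simp [hlt]
  rw [List.filter_append, List.filter_append, e1, e2]
  have hm1 := pvFilterLenMono (PySem.List.pyRange 0 d 1)
    (fun i => decide (pvStab stability i < pvStab stability d))
    (fun i => decide (pvStab stability i < pvStab stability v))
    (fun x _ hx => by simp only [decide_eq_true_eq] at hx ⊢; omega)
  have hm2 := pvFilterLenMono (PySem.List.pyRange (d+1) n 1)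
    (fun i => decide (pvStab stability i < pvStab stability d))
    (fun i => decide (pvStab stability i < pvStab stability v))
    (fun x _ hx => by simp only [decide_eq_true_eq] at hx ⊢; omega)
  simp only [List.length_append, List.length_cons]
  omega

theorem pvChainF_ge_one (edges : List (Int × Int)) (stability : List Int) (f : Nat) (v : Int) :
    1 ≤ pvChainF edges stability f v := by
  cases f with
  | zero => exact le_refl 1
  | succ f =>
    rw [pvChainF]
    exact (PySem.List.le_foldl_max_int (pvSuccs edges stability v)
      (fun d => 1 + pvChainF edges stability f d) 1).1

theorem pvChain_ge_one (n : Int) (edges : List (Int × Int)) (stability : List Int) (v : Int) :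
    1 ≤ pvChain n edges stability v := pvChainF_ge_one edges stability _ v

theorem pvChainF_fuel (n : Int) (edges : List (Int × Int)) (stability : List Int)
    (hpre : Pre_longest_desc_chain n edges stability) :
    ∀ (k : Nat) (v : Int) (f g : Nat), pvRank n stability v = k → k < f → k < g →
      pvChainF edges stability f v = pvChainF edges stability g v := by
  intro k
  induction k using Nat.strong_induction_on with
  | _ k ih =>
    intro v f g hk hf hg
    obtain ⟨f', rfl⟩ : ∃ f', f = f' + 1 := ⟨f - 1, by omega⟩
    obtain ⟨g', rfl⟩ : ∃ g', g = g' + 1 := ⟨g - 1, by omega⟩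
    rw [pvChainF, pvChainF]
    refine PySem.List.foldl_congr_mem _ _ _ _ ?_
    intro acc d hdmem
    have hr := pvRank_lt n edges stability hpre v d hdmem
    rw [ih (pvRank n stability d) (by omega) d f' g' rfl (by omega) (by omega)]

theorem pvChainF_eq_chain (n : Int) (edges : List (Int × Int)) (stability : List Int)
    (hpre : Pre_longest_desc_chain n edges stability) (f : Nat) (v : Int)
    (h : pvRank n stability v < f) :
    pvChainF edges stability f v = pvChain n edges stability v :=
  pvChainF_fuel n edges stability hpre _ v f _ rfl h (Nat.lt_succ_self _)

theorem pvRank_lt_n (n : Int) (stability : List Int) (v : Int)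
    (hv : v ∈ PySem.List.pyRange 0 n 1) : pvRank n stability v < n.toNat := by
  obtain ⟨hv0, hvn⟩ := (PySem.List.mem_pyRange_one).mp hv
  unfold pvRank
  rw [PySem.List.pyRange_one_append 0 v n (by omega) (by omega),
      PySem.List.pyRange_one_cons (show v < n by omega)]
  have e1 : List.filter (fun i => decide (pvStab stability i < pvStab stability v)) (v :: PySem.List.pyRange (v+1) n 1)
      = List.filter (fun i => decide (pvStab stability i < pvStab stability v)) (PySem.List.pyRange (v+1) n 1) := by
    simp
  rw [List.filter_append, e1]
  have c1 := List.length_filter_le (fun i => decide (pvStab stability i < pvStab stability v)) (PySem.List.pyRange 0 v 1)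
  have c2 := List.length_filter_le (fun i => decide (pvStab stability i < pvStab stability v)) (PySem.List.pyRange (v+1) n 1)
  have l1 : (PySem.List.pyRange 0 v 1).length = (v - 0).toNat := PySem.List.length_pyRange_one 0 v
  have l2 : (PySem.List.pyRange (v+1) n 1).length = (n - (v+1)).toNat := PySem.List.length_pyRange_one (v+1) n
  simp only [List.length_append]
  omega

theorem pvFoldMaxAux (c : Int → Int) : ∀ (l : List Int) (a : Int),
    l.foldl (fun b d => max b (1 + c d)) (1 + a) = 1 + l.foldl (fun b d => max b (c d)) a := by
  intro l
  induction l with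
  | nil => intro a; rfl
  | cons x t ih =>
    intro a
    simp only [List.foldl_cons]
    have h : max (1 + a) (1 + c x) = 1 + max a (c x) := by omega
    rw [h, ih]

theorem pvFoldMax (l : List Int) (c : Int → Int) (h : ∀ d ∈ l, 1 ≤ c d) :
    l.foldl (fun b d => max b (1 + c d)) 1 = 1 + (PySem.List.max? (l.map c) (fun x => x)).getD 0 := by
  have step1 : l.foldl (fun b d => max b (1 + c d)) 1
      = 1 + l.foldl (fun b d => max b (c d)) 0 := by
    have := pvFoldMaxAux c l 0
    norm_num at this
    exact this
  rw [step1]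
  congr 1
  cases l with
  | nil => rfl
  | cons x t =>
    rw [List.map_cons, PySem.List.max?_id_cons, Option.getD_some, List.foldl_cons]
    have hx : max 0 (c x) = c x := by have := h x (by simp); omega
    rw [hx, List.foldl_map]

theorem pvChain_of_no_succ (n : Int) (edges : List (Int × Int)) (stability : List Int) (v : Int)
    (h : pvSuccs edges stability v = []) : pvChain n edges stability v = 1 := by
  unfold pvChain
  rw [pvChainF, h]
  rfl

theorem pvSuccs_ne_nil_mem_range (n : Int) (edges : List (Int × Int)) (stability : List Int)
    (hpre : Pre_longest_desc_chain n edges stability) (v : Int)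
    (h : pvSuccs edges stability v ≠ []) : v ∈ PySem.List.pyRange 0 n 1 := by
  rcases List.exists_mem_of_ne_nil _ h with ⟨d, hd⟩
  obtain ⟨h1, h2, _, _, _⟩ := pvSuccs_bounds n edges stability hpre v d hd
  exact PySem.List.mem_pyRange_one.mpr ⟨h1, h2⟩

theorem pvChain_unfold (n : Int) (edges : List (Int × Int)) (stability : List Int)
    (hpre : Pre_longest_desc_chain n edges stability) (v : Int) :
    pvChain n edges stability v =
      1 + (PySem.List.max? ((pvSuccs edges stability v).map (pvChain n edges stability)) (fun x => x)).getD 0 := by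
  conv_lhs => rw [pvChain, pvChainF]
  have hcongr : (pvSuccs edges stability v).foldl
      (fun b d => max b (1 + pvChainF edges stability (pvRank n stability v) d)) 1 =
      (pvSuccs edges stability v).foldl (fun b d => max b (1 + pvChain n edges stability d)) 1 := by
    refine PySem.List.foldl_congr_mem _ _ _ _ ?_
    intro acc d hd
    rw [pvChainF_eq_chain n edges stability hpre _ _ (pvRank_lt n edges stability hpre v d hd)]
  rw [hcongr]
  exact pvFoldMax _ _ (fun d _ => pvChain_ge_one n edges stability d)

theorem pvDpLoop (n : Int) (edges : List (Int × Int)) (stability : List Int)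
    (hpre : Pre_longest_desc_chain n edges stability) :
    ∀ (rest done : List Int) (dp : PySem.Dict Int Int),
      PySem.List.sorted (pvAdjB edges stability).keys (fun i => pvStab stability i) false = done ++ rest →
      (∀ x, dp.contains x = true ↔ x ∈ done) →
      (∀ x ∈ done, dp.getD x 1 = pvChain n edges stability x) →
      (∀ x, (rest.foldl (fun dp node => dp.insert node (1 + (PySem.List.max? (((pvAdjB edges stability).getD node []).map (fun d => dp.getD d 1)) (fun x => x)).getD 0)) dp).contains x = true ↔ x ∈ done ++ rest) ∧
      (∀ x ∈ done ++ rest, (rest.foldl (fun dp node => dp.insert node (1 + (PySem.List.max? (((pvAdjB edges stability).getD node []).map (fun d => dp.getD d 1)) (fun x => x)).getD 0)) dp).getD x 1 = pvChain n edges stability x) := by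
  intro rest
  induction rest with
  | nil =>
    intro done dp hK hc hval
    simp only [List.foldl_nil, List.append_nil]
    exact ⟨hc, hval⟩
  | cons v rest ih =>
    intro done dp hK hc hval
    have hKnodup : (done ++ v :: rest).Nodup := by
      rw [← hK]
      exact ((PySem.List.sorted_perm (pvAdjB edges stability).keys
        (fun i => pvStab stability i) false).nodup_iff).mpr (pvAdjB_keys_nodup edges stability)
    have hpair : (done ++ v :: rest).Pairwise (fun a b => pvStab stability a ≤ pvStab stability b) := by
      rw [← hK]
      exact PySem.List.sorted_pairwise (pvAdjB edges stability).keys (fun i => pvStab stability i)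
    have hvnotdone : v ∉ done := by
      intro hvd
      exact (List.disjoint_of_nodup_append hKnodup) hvd (by simp)
    have hpair' := List.pairwise_append.mp hpair
    have hsucc_val : ∀ d ∈ pvSuccs edges stability v, dp.getD d 1 = pvChain n edges stability d := by
      intro d hd
      by_cases hempty : pvSuccs edges stability d = []
      · have hdK : d ∉ done ++ v :: rest := by
          intro hmem
          rw [← hK] at hmem
          exact ((pvMem_adjB_keys edges stability d).mp
            ((PySem.List.mem_sorted _ _ _ _).mp hmem)) hempty
        have hnc : dp.contains d = false := by
          by_contra hne
          have ht : dp.contains d = true := by revert hne; cases dp.contains d <;> simp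
          exact hdK (List.mem_append_left _ ((hc d).mp ht))
        rw [PySem.Dict.getD_of_not_contains dp 1 hnc,
            pvChain_of_no_succ n edges stability d hempty]
      · have hlt : pvStab stability d < pvStab stability v :=
          (pvSuccs_bounds n edges stability hpre v d hd).2.2.2.2
        have hdK : d ∈ done ++ v :: rest := by
          rw [← hK]
          exact (PySem.List.mem_sorted _ _ _ _).mpr
            ((pvMem_adjB_keys edges stability d).mpr hempty)
        have hdd : d ∈ done := by
          rcases List.mem_append.mp hdK with h | h
          · exact h
          · rcases List.mem_cons.mp h with h | h
            · subst h; exact absurd hlt (lt_irrefl _)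
            · have := (List.pairwise_cons.mp hpair'.2.1).1 d h
              exact absurd hlt (by omega)
        rw [hval d hdd]
    have hVal : 1 + (PySem.List.max? (((pvAdjB edges stability).getD v []).map (fun d => dp.getD d 1)) (fun x => x)).getD 0
        = pvChain n edges stability v := by
      rw [pvAdjB_getD edges stability v, List.map_congr_left hsucc_val]
      exact (pvChain_unfold n edges stability hpre v).symm
    simp only [List.foldl_cons]
    obtain ⟨ha, hb⟩ := ih (done ++ [v])
      (dp.insert v (1 + (PySem.List.max? (((pvAdjB edges stability).getD v []).map (fun d => dp.getD d 1)) (fun x => x)).getD 0))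
      (by rw [hK]; simp)
      (by intro x
          rw [PySem.Dict.contains_insert]
          simp only [Bool.or_eq_true, beq_iff_eq, List.mem_append, List.mem_singleton]
          constructor
          · rintro (rfl | hx)
            · exact Or.inr rfl
            · exact Or.inl ((hc x).mp hx)
          · rintro (hx | rfl)
            · exact Or.inr ((hc x).mpr hx)
            · exact Or.inl rfl)
      (by intro x hx
          rw [PySem.Dict.getD_insert]
          rcases List.mem_append.mp hx with hx | hx
          · rw [if_neg (fun hxy => hvnotdone (by rw [← hxy]; exact hx))]
            exact hval x hx
          · have hxv : x = v := by simpa using hx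
            subst hxv
            rw [if_pos rfl]
            exact hVal)
    have hassoc : (done ++ v :: rest : List Int) = (done ++ [v]) ++ rest := by simp
    refine ⟨?_, ?_⟩
    · intro x
      rw [hassoc]
      exact ha x
    · intro x hx
      exact hb x (by rw [hassoc] at hx; exact hx)

theorem pvFinalEq (n : Int) (edges : List (Int × Int)) (stability : List Int)
    (hpre : Pre_longest_desc_chain n edges stability) (hn : 0 < n) :
    (PySem.List.max? ((PySem.List.pyRange 0 n 1).map (pvChain n edges stability)) (fun x => x)).getD 0
    = (PySem.List.max? ((PySem.List.sorted (pvAdjB edges stability).keys (fun i => pvStab stability i) false).map (pvChain n edges stability)) (fun x => x)).getD 1 := by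
  have hRne : (PySem.List.pyRange 0 n 1).map (pvChain n edges stability) ≠ [] := by
    rw [PySem.List.pyRange_one_cons (by omega : (0:Int) < n)]
    simp
  obtain ⟨a, ha⟩ : ∃ a, PySem.List.max? ((PySem.List.pyRange 0 n 1).map (pvChain n edges stability)) (fun x => x) = some a := by
    cases h : PySem.List.max? ((PySem.List.pyRange 0 n 1).map (pvChain n edges stability)) (fun x => x) with
    | none => exact absurd ((PySem.List.max?_eq_none_iff _ _).mp h) hRne
    | some a => exact ⟨a, rfl⟩
  have haMem := PySem.List.max?_mem ha
  have haMax := PySem.List.max?_isMax ha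
  obtain ⟨i, hiR, hai⟩ := List.mem_map.mp haMem
  by_cases hKnil : PySem.List.sorted (pvAdjB edges stability).keys (fun i => pvStab stability i) false = []
  · have hkeysnil : (pvAdjB edges stability).keys = [] :=
      (PySem.List.sorted_eq_nil_iff _ _ _).mp hKnil
    have hsucci : pvSuccs edges stability i = [] := by
      by_contra hne
      have hmem := (pvMem_adjB_keys edges stability i).mpr hne
      rw [hkeysnil] at hmem
      simp at hmem
    rw [ha, hKnil, List.map_nil, (PySem.List.max?_eq_none_iff _ _).mpr rfl]
    simp only [Option.getD_some, Option.getD_none]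
    rw [← hai, pvChain_of_no_succ n edges stability i hsucci]
  · obtain ⟨b, hb⟩ : ∃ b, PySem.List.max? ((PySem.List.sorted (pvAdjB edges stability).keys (fun i => pvStab stability i) false).map (pvChain n edges stability)) (fun x => x) = some b := by
      cases h : PySem.List.max? ((PySem.List.sorted (pvAdjB edges stability).keys (fun i => pvStab stability i) false).map (pvChain n edges stability)) (fun x => x) with
      | none =>
        rw [PySem.List.max?_eq_none_iff, List.map_eq_nil_iff] at h
        exact absurd h hKnil
      | some b => exact ⟨b, rfl⟩
    have hbMem := PySem.List.max?_mem hb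
    have hbMax := PySem.List.max?_isMax hb
    obtain ⟨k, hkK, hbk⟩ := List.mem_map.mp hbMem
    rw [ha, hb]
    simp only [Option.getD_some]
    have hb_ge_one : 1 ≤ b := hbk ▸ pvChain_ge_one n edges stability k
    have hba : b ≤ a := by
      have hkkeys : k ∈ (pvAdjB edges stability).keys := (PySem.List.mem_sorted _ _ _ _).mp hkK
      have hksucc := (pvMem_adjB_keys edges stability k).mp hkkeys
      have hkR : k ∈ PySem.List.pyRange 0 n 1 :=
        pvSuccs_ne_nil_mem_range n edges stability hpre k hksucc
      have := haMax (pvChain n edges stability k) (List.mem_map.mpr ⟨k, hkR, rfl⟩)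
      simpa [hbk] using this
    have hab : a ≤ b := by
      by_cases hsi : pvSuccs edges stability i = []
      · have ha1 : a = 1 := by
          rw [← hai, pvChain_of_no_succ n edges stability i hsi]
        omega
      · have hiK : i ∈ PySem.List.sorted (pvAdjB edges stability).keys (fun i => pvStab stability i) false :=
          (PySem.List.mem_sorted _ _ _ _).mpr ((pvMem_adjB_keys edges stability i).mpr hsi)
        have := hbMax (pvChain n edges stability i) (List.mem_map.mpr ⟨i, hiK, rfl⟩)
        simpa [hai] using this
    omega

-- ===== VERDICT (by name: the statement is the Claim_ definition above) =====
theorem longest_desc_chain_spec : Claim_equal_longest_desc_chain := by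
  intro n edges stability hdom hpre
  unfold Spec_longest_desc_chain longest_desc_chain longest_desc_chain_alt
  by_cases hn : n ≤ 0
  · rw [if_pos hn, PySem.List.pyRange_one_eq_nil hn, List.map_nil,
        (PySem.List.max?_eq_none_iff _ _).mpr rfl]
    rfl
  · rw [if_neg hn]
    have hA : (PySem.List.pyRange 0 n 1).map (pvDfsA (pvGraphA n edges stability) n.toNat)
        = (PySem.List.pyRange 0 n 1).map (pvChain n edges stability) :=
      List.map_congr_left (fun i hi => by
        rw [pvDfsA_eq_chainF,
            pvChainF_eq_chain n edges stability hpre _ _ (pvRank_lt_n n stability i hi)])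
    rw [hA]
    have hnodupK : (PySem.List.sorted (pvAdjB edges stability).keys (fun i => pvStab stability i) false).Nodup :=
      ((PySem.List.sorted_perm (pvAdjB edges stability).keys
        (fun i => pvStab stability i) false).nodup_iff).mpr (pvAdjB_keys_nodup edges stability)
    have hloop := pvDpLoop n edges stability hpre
      (PySem.List.sorted (pvAdjB edges stability).keys (fun i => pvStab stability i) false)
      [] PySem.Dict.empty (by simp) (by intro x; simp [PySem.Dict.contains_empty]) (by intro x hx; simp at hx)
    have hkeys : (pvDpB stability (pvAdjB edges stability)).keys
        = PySem.List.sorted (pvAdjB edges stability).keys (fun i => pvStab stability i) false := by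
      unfold pvDpB
      rw [PySem.Dict.keys_foldl_insert]
      rw [PySem.Dict.keys_empty, PySem.Set.update_nil_left,
          PySem.Set.ofList_eq_self_of_nodup _ hnodupK]
    have hvalsmap : (pvDpB stability (pvAdjB edges stability)).values
        = (PySem.List.sorted (pvAdjB edges stability).keys (fun i => pvStab stability i) false).map (pvChain n edges stability) := by
      rw [PySem.Dict.values_eq_map_keys _ (by rw [hkeys]; exact hnodupK) 1, hkeys]
      apply List.map_congr_left
      intro x hxK
      exact hloop.2 x (by simpa using hxK)
    rw [hvalsmap]
    exact pvFinalEq n edges stability hpre (by omega)
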